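-- pv_equiv track=rewrite | github.com/dingbat/SIMPLE | app/environments/turtles/turtles/envs/turtles_logic.py | get_push_index
-- ===== SOURCE A (Python) =====
-- def get_push_index(turtle, occupying_stack):
--   if (len(occupying_stack) == 0 or abs(turtle) < abs(occupying_stack[-1])):
--     return len(occupying_stack)
--
--   sum = 0
--   index = len(occupying_stack) - 1
--   for t in occupying_stack[::-1]:
--     sum += abs(t)
--     if abs(turtle) > sum and (index == 0 or abs(turtle) < abs(occupying_stack[index - 1])):
--       return index
--     index -= 1
--
--   return None
-- ===== SOURCE B (Python) =====
-- def get_push_index(turtle, occupying_stack):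
--   n = len(occupying_stack)
--   if n == 0 or abs(turtle) < abs(occupying_stack[-1]):
--     return n
--   w = abs(turtle)
--   total = sum(abs(t) for t in occupying_stack)
--   prefix = 0
--   best = None
--   for i, t in enumerate(occupying_stack):
--     suffix = total - prefix  # sum of abs from index i to the end
--     if w > suffix and (i == 0 or w < abs(occupying_stack[i - 1])):
--       best = i  # keep the highest matching index
--     prefix += abs(t)
--   return best
-- ===== Notes on version B (the rewrite author's own statement) =====
-- stated objective: alternative
-- what changed: Replaced the reversed-list scan with a descending index and growing suffix sum by a single forward pass that precomputes the total weight, derives each suffix-inclusive sum as total minus the running prefix, and keeps the last (highest) matching index.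
import Mathlib
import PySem

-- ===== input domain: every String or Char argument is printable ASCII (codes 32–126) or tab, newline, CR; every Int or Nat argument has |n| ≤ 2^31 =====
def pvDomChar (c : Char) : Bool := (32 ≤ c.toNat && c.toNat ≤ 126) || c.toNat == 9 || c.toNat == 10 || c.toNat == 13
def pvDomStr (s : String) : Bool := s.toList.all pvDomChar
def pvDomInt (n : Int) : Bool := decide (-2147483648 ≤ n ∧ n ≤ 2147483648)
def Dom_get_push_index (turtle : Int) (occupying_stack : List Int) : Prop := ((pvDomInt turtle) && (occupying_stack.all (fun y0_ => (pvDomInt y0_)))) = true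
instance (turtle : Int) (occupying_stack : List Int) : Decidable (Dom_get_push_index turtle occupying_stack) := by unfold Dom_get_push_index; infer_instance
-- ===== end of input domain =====

-- B replaces A's reversed-list scan (descending index, growing suffix sum) by a forward pass
-- with a precomputed total that keeps the last (highest) matching index: alternative decomposition, same cost.

-- ===== PORT A =====
-- A's for-loop over occupying_stack[::-1] carrying `sum` and `index`; `.getD 0` on pyGet? is
-- never the value used: Python's short-circuit guard / `index == 0` guard make the accesses in range.
def pvALoop (turtle : Int) (occ : List Int) : List Int → Int → Int → Option Int
  | [], _, _ => none
  | t :: rest, s, i =>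
    let s' := s + |t|
    if |turtle| > s' ∧ (i = 0 ∨ |turtle| < |(PySem.List.pyGet? occ (i - 1)).getD 0|) then some i
    else pvALoop turtle occ rest s' (i - 1)

def get_push_index (turtle : Int) (occupying_stack : List Int) : Option Int :=
  if occupying_stack.length = 0 ∨ |turtle| < |(PySem.List.pyGet? occupying_stack (-1)).getD 0| then
    some (occupying_stack.length : Int)
  else
    pvALoop turtle occupying_stack
      ((PySem.List.slice? occupying_stack none none (-1)).getD []) 0
      ((occupying_stack.length : Int) - 1)

-- ===== PORT B =====
def get_push_index_alt (turtle : Int) (occupying_stack : List Int) : Option Int :=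
  let n : Int := (occupying_stack.length : Int)
  if n = 0 ∨ |turtle| < |(PySem.List.pyGet? occupying_stack (-1)).getD 0| then some n
  else
    let w := |turtle|
    let total := (occupying_stack.map (fun t => |t|)).sum
    let res := (PySem.List.enumerate occupying_stack).foldl
      (fun (st : Int × Option Int) (p : Int × Int) =>
        let suffix := total - st.1
        let best := if w > suffix ∧ (p.1 = 0 ∨ w < |(PySem.List.pyGet? occupying_stack (p.1 - 1)).getD 0|)
                    then some p.1 else st.2
        (st.1 + |p.2|, best)) ((0 : Int), (none : Option Int))
    res.2

-- ===== PRECONDITION & SPEC =====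
def Spec_get_push_index (turtle : Int) (occupying_stack : List Int) (out : Option Int) : Prop := out = get_push_index_alt turtle occupying_stack
instance (turtle : Int) (occupying_stack : List Int) (out : Option Int) : Decidable (Spec_get_push_index turtle occupying_stack out) := by unfold Spec_get_push_index; infer_instance

-- ===== CLAIM (what is proved, stated in full; the proofs are below) =====
def Claim_equal_get_push_index : Prop := ∀ (turtle : Int) (occupying_stack : List Int), Dom_get_push_index turtle occupying_stack → Spec_get_push_index turtle occupying_stack (get_push_index turtle occupying_stack)

-- ===== LEMMAS AND PROOFS =====

-- sum of absolute values of the suffix of occ starting at index m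
def pvSfx (occ : List Int) (m : Nat) : Int := ((occ.drop m).map (fun t => |t|)).sum

-- the condition both loops test at index m
def pvQ (turtle : Int) (occ : List Int) (m : Nat) : Bool :=
  decide (|turtle| > pvSfx occ m ∧ ((m : Int) = 0 ∨ |turtle| < |(PySem.List.pyGet? occ ((m : Int) - 1)).getD 0|))

theorem pvSfx_step (occ : List Int) (m : Nat) (h : m < occ.length) :
    pvSfx occ m = |occ[m]| + pvSfx occ (m + 1) := by
  unfold pvSfx
  rw [List.drop_eq_getElem_cons h, List.map_cons, List.sum_cons]

theorem pvALoop_spec (turtle : Int) (occ : List Int) :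
    ∀ m, m ≤ occ.length →
      pvALoop turtle occ ((occ.take m).reverse) (pvSfx occ m) ((m : Int) - 1)
        = ((List.range m).reverse.find? (pvQ turtle occ)).map (fun k => (k : Int)) := by
  intro m
  induction m with
  | zero =>
    intro _
    simp only [List.take_zero, List.reverse_nil, List.range_zero, List.find?_nil, pvALoop]
    rfl
  | succ m ih =>
    intro hm
    have hlt : m < occ.length := by omega
    have htake : (occ.take (m + 1)).reverse = occ[m] :: (occ.take m).reverse := by
      rw [List.take_add_one]
      simp [List.getElem?_eq_getElem hlt]
    rw [htake]
    simp only [pvALoop]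
    have hsum : pvSfx occ (m + 1) + |occ[m]| = pvSfx occ m := by
      rw [pvSfx_step occ m hlt]; ring
    have hidx : ((m : Int) + 1) - 1 = (m : Int) := by ring
    push_cast
    rw [hidx, hsum]
    have hrange : (List.range (m + 1)).reverse = m :: (List.range m).reverse := by
      rw [List.range_succ]; simp
    rw [hrange, List.find?_cons]
    by_cases hq : |turtle| > pvSfx occ m ∧ ((m : Int) = 0 ∨ |turtle| < |(PySem.List.pyGet? occ ((m : Int) - 1)).getD 0|)
    · rw [if_pos hq]
      have hqt : pvQ turtle occ m = true := decide_eq_true hq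
      simp [hqt]
    · rw [if_neg hq]
      have hqf : pvQ turtle occ m = false := decide_eq_false hq
      rw [hqf]
      have := ih (by omega)
      simpa using this

theorem pvBLoop_spec (turtle : Int) (occ : List Int) :
    ∀ (l : List Int) (m : Nat) (acc : Option Int), l = occ.drop m →
      (((PySem.List.enumerate l (m : Int)).foldl
        (fun (st : Int × Option Int) (p : Int × Int) =>
          let suffix := (occ.map (fun t => |t|)).sum - st.1
          let best := if |turtle| > suffix ∧ (p.1 = 0 ∨ |turtle| < |(PySem.List.pyGet? occ (p.1 - 1)).getD 0|)
                      then some p.1 else st.2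
          (st.1 + |p.2|, best))
        (((occ.map (fun t => |t|)).sum - pvSfx occ m), acc)).2)
      = match (List.range' m (occ.length - m)).reverse.find? (pvQ turtle occ) with
        | some k => some (k : Int)
        | none => acc := by
  intro l
  induction l with
  | nil =>
    intro m acc hl
    have hm : occ.length ≤ m := by
      have := List.drop_eq_nil_iff.mp hl.symm
      omega
    have : occ.length - m = 0 := by omega
    simp [PySem.List.enumerate, this]
  | cons x xs ih =>
    intro m acc hl
    have hlt : m < occ.length := by
      by_contra h
      have : occ.drop m = [] := List.drop_eq_nil_iff.mpr (by omega)
      rw [this] at hl; exact absurd hl (by simp)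
    have hx : occ[m] = x := by
      have := List.drop_eq_getElem_cons hlt (l := occ)
      rw [this] at hl
      exact (List.cons.injEq _ _ _ _ ▸ hl).1.symm
    have hxs : xs = occ.drop (m + 1) := by
      have := List.drop_eq_getElem_cons hlt (l := occ)
      rw [this] at hl
      exact (List.cons.injEq _ _ _ _ ▸ hl).2
    rw [PySem.List.enumerate_cons, List.foldl_cons]
    have hsfx : (occ.map (fun t => |t|)).sum - ((occ.map (fun t => |t|)).sum - pvSfx occ m) = pvSfx occ m := by ring
    have hpre : ((occ.map (fun t => |t|)).sum - pvSfx occ m) + |x| = (occ.map (fun t => |t|)).sum - pvSfx occ (m + 1) := by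
      rw [← hx, pvSfx_step occ m hlt]; ring
    simp only [hsfx, hpre]
    have hstep := ih (m + 1) (if |turtle| > pvSfx occ m ∧ ((m : Int) = 0 ∨ |turtle| < |(PySem.List.pyGet? occ ((m : Int) - 1)).getD 0|) then some (m : Int) else acc) hxs
    push_cast at hstep ⊢
    rw [hstep]
    have hrange : List.range' m (occ.length - m) = m :: List.range' (m + 1) (occ.length - (m + 1)) := by
      rw [show occ.length - m = (occ.length - (m + 1)) + 1 by omega, List.range'_succ]
    rw [hrange]
    simp only [List.reverse_cons, List.find?_append, List.find?_cons, List.find?_nil]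
    by_cases hq : |turtle| > pvSfx occ m ∧ ((m : Int) = 0 ∨ |turtle| < |(PySem.List.pyGet? occ ((m : Int) - 1)).getD 0|)
    · have hqt : pvQ turtle occ m = true := decide_eq_true hq
      rw [if_pos hq]
      cases hfind : (List.range' (m + 1) (occ.length - (m + 1))).reverse.find? (pvQ turtle occ) <;>
        simp [hqt]
    · have hqf : pvQ turtle occ m = false := decide_eq_false hq
      rw [if_neg hq]
      cases hfind : (List.range' (m + 1) (occ.length - (m + 1))).reverse.find? (pvQ turtle occ) <;>
        simp [hqf]

-- ===== VERDICT (by name: the statement is the Claim_ definition above) =====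
theorem get_push_index_spec : Claim_equal_get_push_index := by
  intro turtle occ _
  unfold Spec_get_push_index get_push_index get_push_index_alt
  by_cases hg : occ.length = 0 ∨ |turtle| < |(PySem.List.pyGet? occ (-1)).getD 0|
  · have hg' : (occ.length : Int) = 0 ∨ |turtle| < |(PySem.List.pyGet? occ (-1)).getD 0| := by
      rcases hg with h | h
      · left; exact_mod_cast h
      · right; exact h
    rw [if_pos hg, if_pos hg']
  · have hg' : ¬ ((occ.length : Int) = 0 ∨ |turtle| < |(PySem.List.pyGet? occ (-1)).getD 0|) := by
      intro h; apply hg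
      rcases h with h | h
      · left; exact_mod_cast h
      · right; exact h
    rw [if_neg hg, if_neg hg']
    have hA := pvALoop_spec turtle occ occ.length (le_refl _)
    have hB := pvBLoop_spec turtle occ occ (0 : Nat) none (by simp)
    rw [PySem.List.slice?_none_none_neg_one]
    simp only [Option.getD_some]
    have hrev : occ.take occ.length = occ := by simp
    rw [hrev] at hA
    have hsfx0 : pvSfx occ occ.length = 0 := by simp [pvSfx]
    rw [hsfx0] at hA
    have hsub : (occ.map (fun t => |t|)).sum - pvSfx occ 0 = 0 := by simp [pvSfx]
    rw [hsub] at hB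
    have hrange0 : List.range' 0 (occ.length - 0) = List.range occ.length := by
      simp [List.range_eq_range']
    rw [hrange0] at hB
    simp only [Nat.cast_zero] at hB
    rw [hA, hB]
    cases hfind : (List.range occ.length).reverse.find? (pvQ turtle occ) <;> simp
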